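-- pv_equiv track=rewrite | github.com/alphatw221/algotech-lss-django | backend/utils/common/text_processing/order_code_processor.py | order_qty_in_comment
-- ===== SOURCE A (Python) =====
-- def order_qty_in_comment(comment, order_code):
--     porduct_name_index = comment.find(order_code)
--     if porduct_name_index == -1:  # -1 means no match
--         return None
--
--     # If product_name is in the comment, calculate the amount
--     order_amount = ""
--     # We find the closest consecutive digits after product_name in the string
--     begin_index = porduct_name_index + len(order_code)
--     # Scan rest of the string for exception rules
--     for char_index in range(begin_index, len(comment)):
--         # If there's a "?" after order code, the order doesn't count
--         if comment[char_index] == "?":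
--             return None
--
--     plus_one_chars = set('+*Xx')
--     having_plus_one_char = False
--     # Find the first index that is a digit
--     first_digit_index = len(comment)
--     for char_index in range(begin_index, len(comment)):
--         if having_plus_one_char:
--             # Find the first digit
--             if comment[char_index].isdigit():
--                 first_digit_index = char_index
--                 break
--         else:
--             if comment[char_index] in plus_one_chars:
--                 having_plus_one_char = True
--             elif comment[char_index] == ' ':
--                 pass
--             else:
--                 return None
--
--     # Check the remaining char after order code
--     for char_index in range(first_digit_index, len(comment)):
--         if comment[char_index].isdigit():
--             order_amount += comment[char_index]
--         elif not order_amount: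
--             continue
--         else:
--             break
--
-- #    # If there's none, we find the closest consecutive digits before product_name
-- #    if not order_amount:
-- #         begin_index = porduct_name_index
-- #         for char_index in reversed(range(0, begin_index)):
-- #             if comment[char_index].isdigit():
-- #                 order_amount = comment[char_index] + order_amount
-- #             elif not order_amount:
-- #                 continue
-- #             else:
-- #                 break
--
--     if not order_amount:
--         return None
--     return int(order_amount)
-- ===== SOURCE B (Python) =====
-- def order_qty_in_comment(comment, order_code):
--     i = comment.find(order_code)
--     if i == -1:
--         return None
--     # One pass over the remainder with a 4-state machine; decide at the end.
--     EXPECT, SEEK, DIGITS, DONE = 0, 1, 2, 3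
--     state, digits, bad, qmark = EXPECT, "", False, False
--     for ch in comment[i + len(order_code):]:
--         if ch == '?':
--             qmark = True
--         if state == EXPECT:
--             if ch in '+*Xx':
--                 state = SEEK
--             elif ch != ' ':
--                 bad = True
--                 state = DONE
--         elif state == SEEK:
--             if ch.isdigit():
--                 digits = ch
--                 state = DIGITS
--         elif state == DIGITS:
--             if ch.isdigit():
--                 digits += ch
--             else:
--                 state = DONE
--     if qmark or bad or not digits:
--         return None
--     return int(digits)
-- ===== Notes on version B (the rewrite author's own statement) =====
-- stated objective: alternative
-- what changed: Replaced A's three staged index scans (a '?' scan, a flagged symbol/first-digit scan, a digit-collecting scan) with a single left-to-right pass over the remainder driven by a four-state machine ('?' and badness recorded as flags, the verdict taken once at the end).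
import Mathlib
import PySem

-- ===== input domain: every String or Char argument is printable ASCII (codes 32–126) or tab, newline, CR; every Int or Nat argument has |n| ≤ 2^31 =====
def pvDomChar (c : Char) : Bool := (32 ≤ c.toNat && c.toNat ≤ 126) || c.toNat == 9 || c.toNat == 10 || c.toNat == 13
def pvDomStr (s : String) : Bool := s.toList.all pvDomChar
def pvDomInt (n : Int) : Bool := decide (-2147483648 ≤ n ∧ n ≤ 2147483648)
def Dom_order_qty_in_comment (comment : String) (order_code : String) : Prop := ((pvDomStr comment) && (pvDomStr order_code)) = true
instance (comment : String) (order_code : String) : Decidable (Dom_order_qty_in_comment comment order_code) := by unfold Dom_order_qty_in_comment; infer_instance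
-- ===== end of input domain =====

-- B replaces A's three staged index scans with one left-to-right pass driven by a
-- four-state machine (flags for '?' and badness, verdict taken once at the end).

-- ===== PORT A =====
-- loop 1: scan rest of string for a '?' (early return None)
def aScanQ : List Char → Bool
  | [] => false
  | c :: cs => if c = '?' then true else aScanQ cs

-- loop 2: before a plus-one char only spaces are allowed (else early None);
-- after it, find the first digit. 'some suffix' = comment[first_digit_index:]
-- ('some []' = first_digit_index = len(comment)); 'none' = the early 'return None'.
def aFindDigit (havingPlus : Bool) : List Char → Option (List Char)
  | [] => some []
  | c :: cs =>
    if havingPlus then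
      if c.isDigit then some (c :: cs) else aFindDigit true cs
    else
      if (['+', '*', 'X', 'x'] : List Char).contains c then aFindDigit true cs
      else if c = ' ' then aFindDigit false cs
      else none

-- loop 3: collect the consecutive digit run into order_amount
def aCollect (acc : List Char) : List Char → List Char
  | [] => acc
  | c :: cs =>
    if c.isDigit then aCollect (acc ++ [c]) cs
    else if acc = [] then aCollect acc cs
    else acc

def order_qty_in_comment (comment : String) (order_code : String) : Option Int :=
  let idx := PySem.Str.find comment order_code
  if idx = -1 then none
  else
    -- the three range(begin_index, len(comment)) loops all walk comment[begin_index:]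
    let rest := comment.toList.drop (idx.toNat + order_code.toList.length)
    if aScanQ rest then none
    else
      match aFindDigit false rest with
      | none => none
      | some suffix =>
        let amount := aCollect [] suffix
        if amount = [] then none else PySem.Int.ofChars? amount

-- ===== PORT B =====
-- Source B's state machine: states 0 = EXPECT, 1 = SEEK, 2 = DIGITS, 3 = DONE;
-- state = (st, digits, bad, qmark). The '?' flag is set before the state dispatch.
def bStep (s : Nat × List Char × Bool × Bool) (ch : Char) : Nat × List Char × Bool × Bool :=
  match s with
  | (st, digits, bad, qm) =>
    let qm := qm || (ch = '?')
    if st = 0 then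
      if (['+', '*', 'X', 'x'] : List Char).contains ch then (1, digits, bad, qm)
      else if ch = ' ' then (0, digits, bad, qm)
      else (3, digits, true, qm)
    else if st = 1 then
      if ch.isDigit then (2, [ch], bad, qm)
      else (1, digits, bad, qm)
    else if st = 2 then
      if ch.isDigit then (2, digits ++ [ch], bad, qm)
      else (3, digits, bad, qm)
    else (3, digits, bad, qm)

def order_qty_in_comment_alt (comment : String) (order_code : String) : Option Int :=
  let i := PySem.Str.find comment order_code
  if i = -1 then none
  else
    let rest := comment.toList.drop (i.toNat + order_code.toList.length)
    let r := rest.foldl bStep (0, [], false, false)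
    if r.2.2.2 = true ∨ r.2.2.1 = true ∨ r.2.1 = [] then none
    else PySem.Int.ofChars? r.2.1

-- ===== PRECONDITION & SPEC =====
def Spec_order_qty_in_comment (comment : String) (order_code : String) (out : Option Int) : Prop := out = order_qty_in_comment_alt comment order_code
instance (comment : String) (order_code : String) (out : Option Int) : Decidable (Spec_order_qty_in_comment comment order_code out) := by unfold Spec_order_qty_in_comment; infer_instance

-- ===== CLAIM (what is proved, stated in full; the proofs are below) =====
def Claim_equal_order_qty_in_comment : Prop := ∀ (comment : String) (order_code : String), Dom_order_qty_in_comment comment order_code → Spec_order_qty_in_comment comment order_code (order_qty_in_comment comment order_code)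

-- ===== LEMMAS AND PROOFS =====

theorem aScanQ_eq_contains (l : List Char) : aScanQ l = l.contains '?' := by
  induction l with
  | nil => rfl
  | cons c cs ih =>
    by_cases h : c = '?' <;> simp [aScanQ, h, ih, eq_comm]

theorem aFindDigit_true (l : List Char) :
    aFindDigit true l = some (l.dropWhile (fun c => !c.isDigit)) := by
  induction l with
  | nil => rfl
  | cons c cs ih =>
    by_cases h : c.isDigit <;> simp [aFindDigit, h, ih]

theorem aFindDigit_false (l : List Char) :
    aFindDigit false l =
      match l.dropWhile (· = ' ') with
      | [] => some []
      | c :: cs =>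
        if (['+', '*', 'X', 'x'] : List Char).contains c then aFindDigit true cs
        else none := by
  induction l with
  | nil => rfl
  | cons c cs ih =>
    by_cases hp : (['+', '*', 'X', 'x'] : List Char).contains c
    · have hs : ¬ c = ' ' := by
        rcases List.contains_iff_exists_mem_beq .. |>.mp hp with ⟨a, ha, hb⟩
        fin_cases ha <;> simp_all
      simp [aFindDigit, hs]
    · by_cases hs : c = ' '
      · simp [aFindDigit, hs, ih]
      · simp [aFindDigit, hs]

theorem aCollect_nonempty (acc : List Char) (h : acc ≠ []) (l : List Char) :
    aCollect acc l = acc ++ l.takeWhile Char.isDigit := by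
  induction l generalizing acc with
  | nil => simp [aCollect]
  | cons c cs ih =>
    by_cases hd : c.isDigit <;>
      simp [aCollect, hd, h, ih]

theorem aCollect_nil (l : List Char) :
    aCollect [] l = (l.dropWhile (fun c => !c.isDigit)).takeWhile Char.isDigit := by
  induction l with
  | nil => rfl
  | cons c cs ih =>
    by_cases hd : c.isDigit
    · simp [aCollect, hd, aCollect_nonempty [c] (by simp) cs]
    · simp [aCollect, hd, ih]

-- the '?' flag accumulates uniformly in every state
theorem bFold_qm (l : List Char) (st : Nat) (d : List Char) (b qm : Bool) :
    (List.foldl bStep (st, d, b, qm) l).2.2.2 = (qm || l.contains '?') := by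
  induction l generalizing st d b qm with
  | nil => simp
  | cons c cs ih =>
    simp only [List.foldl_cons, List.contains_cons]
    rw [show List.foldl bStep (bStep (st, d, b, qm) c) cs =
          List.foldl bStep ((bStep (st, d, b, qm) c).1, (bStep (st, d, b, qm) c).2.1,
            (bStep (st, d, b, qm) c).2.2.1, (bStep (st, d, b, qm) c).2.2.2) cs from rfl]
    rw [ih]
    have : (bStep (st, d, b, qm) c).2.2.2 = (qm || (c = '?')) := by
      simp only [bStep]; split_ifs <;> rfl
    rw [this]
    cases qm <;> by_cases hc : c = '?' <;> (simp [hc]; try exact fun h => absurd h.symm hc)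

theorem bFold_done (l : List Char) (d : List Char) (b qm : Bool) :
    List.foldl bStep (3, d, b, qm) l = (3, d, b, qm || l.contains '?') := by
  induction l generalizing qm with
  | nil => simp
  | cons c cs ih =>
    simp only [List.foldl_cons, List.contains_cons]
    rw [show bStep (3, d, b, qm) c = (3, d, b, qm || (c = '?')) from by
      simp [bStep]]
    rw [ih]
    cases qm <;> by_cases hc : c = '?' <;> (simp [hc]; try exact fun h => absurd h.symm hc)

theorem bFold_digits (l : List Char) (d : List Char) (hd : d ≠ []) (b qm : Bool) :
    (List.foldl bStep (2, d, b, qm) l).2.1 = d ++ l.takeWhile Char.isDigit ∧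
    (List.foldl bStep (2, d, b, qm) l).2.2.1 = b := by
  induction l generalizing d qm with
  | nil => simp
  | cons c cs ih =>
    by_cases hc : c.isDigit
    · have hq : ¬ c = '?' := by
        intro h; subst h; simp [Char.isDigit] at hc
      simp only [List.foldl_cons]
      rw [show bStep (2, d, b, qm) c = (2, d ++ [c], b, qm || (c = '?')) from by
        simp [bStep, hc]]
      rcases ih (d ++ [c]) (by simp) (qm || (c = '?')) with ⟨h1, h2⟩
      simp [h1, h2, hc]
    · simp only [List.foldl_cons]
      rw [show bStep (2, d, b, qm) c = (3, d, b, qm || (c = '?')) from by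
        simp [bStep, hc]]
      rw [bFold_done]
      simp [hc]

theorem bFold_seek (l : List Char) (d : List Char) (b qm : Bool) :
    (List.foldl bStep (1, d, b, qm) l).2.1 =
      (if (l.dropWhile (fun c => !c.isDigit)).takeWhile Char.isDigit = []
       then d else (l.dropWhile (fun c => !c.isDigit)).takeWhile Char.isDigit) ∧
    (List.foldl bStep (1, d, b, qm) l).2.2.1 = b := by
  induction l generalizing qm with
  | nil => simp
  | cons c cs ih =>
    by_cases hc : c.isDigit
    · simp only [List.foldl_cons]
      rw [show bStep (1, d, b, qm) c = (2, [c], b, qm || (c = '?')) from by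
        simp [bStep, hc]]
      rcases bFold_digits cs [c] (by simp) b (qm || (c = '?')) with ⟨h1, h2⟩
      simp [h1, h2, hc]
    · simp only [List.foldl_cons]
      rw [show bStep (1, d, b, qm) c = (1, d, b, qm || (c = '?')) from by
        simp [bStep, hc]]
      rcases ih (qm || (c = '?')) with ⟨h1, h2⟩
      simp [h1, h2, hc]

theorem bFold_expect (l : List Char) (qm : Bool) :
    ((List.foldl bStep (0, ([] : List Char), false, qm) l).2.2.1,
     (List.foldl bStep (0, ([] : List Char), false, qm) l).2.1) =
      match l.dropWhile (· = ' ') with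
      | [] => (false, [])
      | c :: cs =>
        if (['+', '*', 'X', 'x'] : List Char).contains c then
          (false, (cs.dropWhile (fun c => !c.isDigit)).takeWhile Char.isDigit)
        else (true, ([] : List Char)) := by
  induction l generalizing qm with
  | nil => simp
  | cons c cs ih =>
    by_cases hp : (['+', '*', 'X', 'x'] : List Char).contains c
    · have hs : ¬ c = ' ' := by
        rcases List.contains_iff_exists_mem_beq .. |>.mp hp with ⟨a, ha, hb⟩
        fin_cases ha <;> simp_all
      simp only [List.foldl_cons]
      have hp' : c = '+' ∨ c = '*' ∨ c = 'X' ∨ c = 'x' := by simpa using hp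
      rw [show bStep (0, ([] : List Char), false, qm) c = (1, [], false, qm || (c = '?')) from by
        rcases hp' with h | h | h | h <;> (subst h; rfl)]
      rcases bFold_seek cs [] false (qm || (c = '?')) with ⟨h1, h2⟩
      simp [h1, h2, hs]
      split_ifs <;> simp_all
    · by_cases hs : c = ' '
      · simp only [List.foldl_cons]
        rw [show bStep (0, ([] : List Char), false, qm) c = (0, [], false, qm || (c = '?')) from by
          simp [bStep, hs]]
        rw [ih]
        simp [hs]
      · simp only [List.foldl_cons]
        have hp2 : ¬c = '+' ∧ ¬c = '*' ∧ ¬c = 'X' ∧ ¬c = 'x' := by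
          simpa [not_or] using hp
        rw [show bStep (0, ([] : List Char), false, qm) c = (3, [], true, qm || (c = '?')) from by
          simp [bStep, hp2.1, hp2.2.1, hp2.2.2.1, hp2.2.2.2, hs]]
        rw [bFold_done]
        simp only [List.dropWhile_cons, hs, decide_eq_true_eq]
        simp [hp2.1, hp2.2.1, hp2.2.2.1, hp2.2.2.2]

-- ===== VERDICT (by name: the statement is the Claim_ definition above) =====
theorem order_qty_in_comment_spec : Claim_equal_order_qty_in_comment := by
  intro comment order_code _
  unfold Spec_order_qty_in_comment order_qty_in_comment order_qty_in_comment_alt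
  by_cases h1 : PySem.Str.find comment order_code = -1
  · simp only [h1]
    simp
  · simp only [h1, if_false]
    set rest := comment.toList.drop ((PySem.Str.find comment order_code).toNat + order_code.toList.length) with hrest
    rw [aScanQ_eq_contains, aFindDigit_false]
    have hqm := bFold_qm rest 0 [] false false
    have hex := bFold_expect rest false
    by_cases h2 : '?' ∈ rest
    · have hc : rest.contains '?' = true := by simpa using h2
      rw [hc] at hqm
      simp [h2, hqm]
    · have h2' : rest.contains '?' = false := by simpa using h2
      rw [h2'] at hqm
      simp only [h2', Bool.false_eq_true, if_false, Bool.or_false] at hqm ⊢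
      cases hdw : rest.dropWhile (· = ' ') with
      | nil =>
        rw [hdw] at hex
        simp only at hex
        have hb : (List.foldl bStep (0, [], false, false) rest).2.2.1 = false :=
          congrArg Prod.fst hex
        have hd : (List.foldl bStep (0, [], false, false) rest).2.1 = [] :=
          congrArg Prod.snd hex
        simp [aCollect, hqm, hb, hd]
      | cons c cs =>
        rw [hdw] at hex
        by_cases hp : (['+', '*', 'X', 'x'] : List Char).contains c
        · simp only [hp, if_true] at hex
          have hb : (List.foldl bStep (0, [], false, false) rest).2.2.1 = false :=
            congrArg Prod.fst hex
          have hd : (List.foldl bStep (0, [], false, false) rest).2.1 =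
              (cs.dropWhile (fun c => !c.isDigit)).takeWhile Char.isDigit :=
            congrArg Prod.snd hex
          simp only [hp, if_true, aFindDigit_true]
          rw [aCollect_nil, List.dropWhile_idempotent]
          simp [hqm, hb, hd]
        · have hp2 : ¬c = '+' ∧ ¬c = '*' ∧ ¬c = 'X' ∧ ¬c = 'x' := by
            simpa [not_or] using hp
          simp only [hp, Bool.false_eq_true, if_false] at hex
          have hb : (List.foldl bStep (0, [], false, false) rest).2.2.1 = true :=
            congrArg Prod.fst hex
          simp [hb, hp2.1, hp2.2.1, hp2.2.2.1, hp2.2.2.2]
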